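-- pv_equiv track=rewrite | github.com/christopherjohnmayor/DockerDeployer | generate_performance_report.py | _calculate_overall_grade
-- ===== SOURCE A (Python) =====
-- from typing import Dict, List, Any
--
-- def _calculate_overall_grade(analysis: Dict[str, Any]) -> str:
--     """Calculate overall performance grade."""
--     grades = []
--     for component in analysis.values():
--         if component.get("performance_grade"):
--             grades.append(component["performance_grade"])
--
--     if not grades:
--         return "N/A"
--
--     # Simple grade calculation (can be enhanced)
--     if all(g == "A+" for g in grades):
--         return "A+"
--     elif all(g in ["A+", "B+"] for g in grades):
--         return "B+"
--     else:
--         return "C"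
-- ===== SOURCE B (Python) =====
-- def _calculate_overall_grade(analysis):
--     """Calculate overall performance grade."""
--     # Single pass: track the worst severity seen (-1 = no grades,
--     # 0 = A+, 1 = B+, 2 = anything else); decode at the end.
--     worst = -1
--     for component in analysis.values():
--         g = component.get("performance_grade")
--         if g:
--             worst = max(worst, 0 if g == "A+" else 1 if g == "B+" else 2)
--     if worst < 0:
--         return "N/A"
--     if worst == 0:
--         return "A+"
--     if worst == 1:
--         return "B+"
--     return "C"
-- ===== Notes on version B (the rewrite author's own statement) =====
-- stated objective: alternative
-- what changed: Replaces A's collect-a-list-then-two-all()-scans classification with a single pass that maintains only the maximum severity (A+=0, B+=1, other=2, none=-1) and decodes that integer to the grade at the end.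
import Mathlib
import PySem

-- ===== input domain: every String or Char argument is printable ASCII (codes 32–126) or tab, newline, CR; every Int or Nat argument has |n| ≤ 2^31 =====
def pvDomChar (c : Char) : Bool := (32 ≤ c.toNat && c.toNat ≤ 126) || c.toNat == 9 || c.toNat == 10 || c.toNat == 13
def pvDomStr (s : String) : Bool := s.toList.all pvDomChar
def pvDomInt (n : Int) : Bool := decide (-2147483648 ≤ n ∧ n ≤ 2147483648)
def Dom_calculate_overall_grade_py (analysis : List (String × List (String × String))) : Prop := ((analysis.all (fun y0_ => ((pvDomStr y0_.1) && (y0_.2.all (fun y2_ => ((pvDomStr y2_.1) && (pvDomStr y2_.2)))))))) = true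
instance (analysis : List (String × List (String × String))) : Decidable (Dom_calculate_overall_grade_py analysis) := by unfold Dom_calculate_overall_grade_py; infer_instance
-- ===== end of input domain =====

-- B replaces A's collect-list-then-two-all()-scans with a single pass maintaining the maximum severity (A+=0, B+=1, other=2, none=-1), decoded at the end (alternative decomposition, same cost).
-- ===== PORT A =====
def calculate_overall_grade_py (analysis : List (String × List (String × String))) : String :=
  let grades := analysis.foldl (fun gs comp =>
    match PySem.Dict.get? (PySem.Dict.mk comp.2) "performance_grade" with
    | some s => if s = "" then gs else gs ++ [s]
    | none => gs) []
  if grades = [] then "N/A"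
  else if grades.all (fun g => g == "A+") then "A+"
  else if grades.all (fun g => g == "A+" || g == "B+") then "B+"
  else "C"

-- ===== PORT B =====
def calculate_overall_grade_py_alt (analysis : List (String × List (String × String))) : String :=
  let worst : Int := analysis.foldl (fun w comp =>
    match PySem.Dict.get? (PySem.Dict.mk comp.2) "performance_grade" with
    | some g => if g = "" then w else max w (if g = "A+" then 0 else if g = "B+" then 1 else 2)
    | none => w) (-1)
  if worst < 0 then "N/A"
  else if worst = 0 then "A+"
  else if worst = 1 then "B+"
  else "C"

-- ===== PRECONDITION & SPEC =====
def Spec_calculate_overall_grade_py (analysis : List (String × List (String × String))) (out : String) : Prop := out = calculate_overall_grade_py_alt analysis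
instance (analysis : List (String × List (String × String))) (out : String) : Decidable (Spec_calculate_overall_grade_py analysis out) := by unfold Spec_calculate_overall_grade_py; infer_instance

-- ===== CLAIM (what is proved, stated in full; the proofs are below) =====
def Claim_equal_calculate_overall_grade_py : Prop := ∀ (analysis : List (String × List (String × String))), Dom_calculate_overall_grade_py analysis → Spec_calculate_overall_grade_py analysis (calculate_overall_grade_py analysis)

-- ===== LEMMAS AND PROOFS =====

-- severity of one grade, as B computes it
def pvSev (g : String) : Int := if g = "A+" then 0 else if g = "B+" then 1 else 2

-- extraction of the present grades, shared shape of both folds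
def pvGrade? (comp : String × List (String × String)) : Option String :=
  match PySem.Dict.get? (PySem.Dict.mk comp.2) "performance_grade" with
  | some s => if s = "" then none else some s
  | none => none

-- A's foldl-append accumulation equals acc ++ filterMap of pvGrade?
theorem pv_foldl_eq_filterMap (l : List (String × List (String × String))) (acc : List String) :
    l.foldl (fun gs comp =>
      match PySem.Dict.get? (PySem.Dict.mk comp.2) "performance_grade" with
      | some s => if s = "" then gs else gs ++ [s]
      | none => gs) acc
    = acc ++ l.filterMap pvGrade? := by
  induction l generalizing acc with
  | nil => simp
  | cons h t ih =>
    simp only [List.foldl_cons, List.filterMap_cons]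
    cases hq : PySem.Dict.get? (PySem.Dict.mk h.2) "performance_grade" with
    | none => simp [pvGrade?, hq, ih]
    | some s => by_cases hs : s = "" <;> simp [pvGrade?, hq, hs, ih]

-- B's fold over the analysis equals the max-of-severity fold over the extracted grades
theorem pv_foldl_worst (l : List (String × List (String × String))) (w : Int) :
    l.foldl (fun w comp =>
      match PySem.Dict.get? (PySem.Dict.mk comp.2) "performance_grade" with
      | some g => if g = "" then w else max w (if g = "A+" then 0 else if g = "B+" then 1 else 2)
      | none => w) w
    = (l.filterMap pvGrade?).foldl (fun w g => max w (pvSev g)) w := by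
  induction l generalizing w with
  | nil => simp
  | cons h t ih =>
    simp only [List.foldl_cons, List.filterMap_cons]
    cases hq : PySem.Dict.get? (PySem.Dict.mk h.2) "performance_grade" with
    | none => simp [pvGrade?, hq, ih]
    | some s => by_cases hs : s = "" <;> simp [pvGrade?, hq, hs, ih, pvSev]

-- characterisation of the running maximum
theorem pv_worst_le (l : List String) (w k : Int) :
    l.foldl (fun w g => max w (pvSev g)) w ≤ k ↔ (w ≤ k ∧ ∀ g ∈ l, pvSev g ≤ k) := by
  induction l generalizing w with
  | nil => simp
  | cons h t ih =>
    simp only [List.foldl_cons, ih, max_le_iff, List.mem_cons]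
    constructor
    · rintro ⟨⟨hw, hh⟩, ht⟩
      exact ⟨hw, fun g hg => by rcases hg with rfl | hg; exact hh; exact ht g hg⟩
    · rintro ⟨hw, hall⟩
      exact ⟨⟨hw, hall h (Or.inl rfl)⟩, fun g hg => hall g (Or.inr hg)⟩

theorem pv_sev_nonneg (g : String) : 0 ≤ pvSev g := by
  unfold pvSev; split_ifs <;> omega

-- ===== VERDICT (by name: the statement is the Claim_ definition above) =====
theorem calculate_overall_grade_py_spec : Claim_equal_calculate_overall_grade_py := by
  intro analysis _
  unfold Spec_calculate_overall_grade_py calculate_overall_grade_py calculate_overall_grade_py_alt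
  simp only [pv_foldl_eq_filterMap, pv_foldl_worst, List.nil_append]
  set grades := analysis.filterMap pvGrade? with hg
  set worst := grades.foldl (fun w g => max w (pvSev g)) (-1) with hw
  by_cases hnil : grades = []
  · have : worst < 0 := by simp [hw, hnil]
    simp [hnil, this]
  · -- worst ≥ 0 since some grade exists
    obtain ⟨g0, hg0⟩ := List.exists_mem_of_ne_nil grades hnil
    have hpos : ¬ worst < 0 := by
      intro hlt
      have := (pv_worst_le grades (-1) (-1)).mp (by omega)
      have := this.2 g0 hg0
      have := pv_sev_nonneg g0
      omega
    simp only [hnil, if_neg hpos, if_false]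
    by_cases hA : grades.all (fun g => g == "A+")
    · have h0 : worst ≤ 0 := by
        rw [hw, pv_worst_le]
        refine ⟨by omega, fun g hgm => ?_⟩
        have := List.all_eq_true.mp hA g hgm
        simp only [beq_iff_eq] at this
        simp [pvSev, this]
      have : worst = 0 := by
        by_contra hne
        have := (pv_worst_le grades (-1) (-1)).mpr ⟨le_refl _, fun g hgm => ?_⟩
        · omega
        · have := List.all_eq_true.mp hA g hgm
          simp only [beq_iff_eq] at this
          exfalso
          have h1 : pvSev g = 0 := by simp [pvSev, this]
          have := (pv_worst_le grades (-1) 0).mpr ⟨by omega, fun g hgm => by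
            have := List.all_eq_true.mp hA g hgm
            simp only [beq_iff_eq] at this
            simp [pvSev, this]⟩
          omega
      simp [hA, this]
    · -- not all A+: worst ≠ 0
      have hne0 : worst ≠ 0 := by
        intro h0
        apply hA
        rw [List.all_eq_true]
        intro g hgm
        have := (pv_worst_le grades (-1) 0).mp (by omega)
        have hle := this.2 g hgm
        simp only [pvSev] at hle
        by_cases h : g = "A+"
        · simp [h]
        · simp [h] at hle; split_ifs at hle <;> omega
      by_cases hB : grades.all (fun g => g == "A+" || g == "B+")
      · have h1 : worst ≤ 1 := by
          rw [hw, pv_worst_le]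
          refine ⟨by omega, fun g hgm => ?_⟩
          have := List.all_eq_true.mp hB g hgm
          simp only [beq_iff_eq, Bool.or_eq_true] at this
          rcases this with h | h <;> simp [pvSev, h]
        have : worst = 1 := by omega
        simp [hA, hB, this]
      · -- some grade outside {A+, B+}: worst = 2
        have hne1 : worst ≠ 1 := by
          intro h1
          apply hB
          rw [List.all_eq_true]
          intro g hgm
          have := (pv_worst_le grades (-1) 1).mp (by omega)
          have hle := this.2 g hgm
          simp only [pvSev] at hle
          by_cases hA' : g = "A+"
          · simp [hA']
          · by_cases hB' : g = "B+"
            · simp [hB']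
            · simp [hA', hB'] at hle
        simp [hA, hB, hne0, hne1]
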